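-- pv_equiv track=rewrite | github.com/Ryeong-j/Programmers_Codingtest | 프로그래머스/0/120815. 피자 나눠 먹기 （2）/피자 나눠 먹기 （2）.py | solution
-- ===== SOURCE A (Python) =====
-- def solution(n):
--     a=n
--     b=6
--     r=0
--
--     while b!=0:
--         r=a%b
--         a=b
--         b=r
--
--     return n*6//a//6
-- ===== SOURCE B (Python) =====
-- def solution(n):
--     r = n % 6
--     if r == 0:
--         d = 6
--     elif r == 3:
--         d = 3
--     elif r % 2 == 0:
--         d = 2
--     else:
--         d = 1
--     return n // d
-- ===== Notes on version B (the rewrite author's own statement) =====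
-- stated objective: simpler
-- what changed: B replaces A's Euclidean gcd loop by a direct case table on n % 6 (the residue alone determines the gcd of n and 6) and a single floor division, with no loop or maintained state.
import Mathlib
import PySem

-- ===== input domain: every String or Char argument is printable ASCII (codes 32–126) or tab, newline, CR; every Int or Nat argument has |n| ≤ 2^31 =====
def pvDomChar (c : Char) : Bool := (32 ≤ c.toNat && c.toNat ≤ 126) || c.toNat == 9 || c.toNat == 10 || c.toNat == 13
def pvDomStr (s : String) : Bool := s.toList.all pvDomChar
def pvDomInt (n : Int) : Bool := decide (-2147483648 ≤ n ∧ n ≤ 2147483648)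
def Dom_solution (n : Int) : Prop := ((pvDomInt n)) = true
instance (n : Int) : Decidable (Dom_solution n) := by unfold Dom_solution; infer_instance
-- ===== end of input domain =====

-- B replaces A's Euclidean gcd loop by a case table on n % 6 (the residue determines the gcd of n and 6)
-- and one floor division; both are total and agree on every Int.

-- termination fact for the Euclid loop (cited by solGo's decreasing_by)
theorem pvModAbsLt (a b : Int) (hb : b ≠ 0) :
    (PySem.Int.mod a b).natAbs < b.natAbs := by
  rcases lt_or_gt_of_ne hb with h | h
  · have := PySem.Int.mod_neg_bounds a h
    omega
  · have h1 := PySem.Int.mod_nonneg a h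
    have h2 := PySem.Int.mod_lt a h
    omega

-- ===== PORT A =====
-- while b != 0: r = a % b; a = b; b = r   (state (a, b); r is dead after the loop)
def solGo (a b : Int) : Int :=
  if hb : b = 0 then a
  else solGo b (PySem.Int.mod a b)
termination_by b.natAbs
decreasing_by exact pvModAbsLt a b hb

def solution (n : Int) : Int :=
  let a := solGo n 6
  PySem.Int.floordiv (PySem.Int.floordiv (n * 6) a) 6

-- ===== PORT B =====
def solution_alt (n : Int) : Int :=
  let r := PySem.Int.mod n 6
  let d : Int := if r = 0 then 6 else if r = 3 then 3 else if PySem.Int.mod r 2 = 0 then 2 else 1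
  PySem.Int.floordiv n d

-- ===== PRECONDITION & SPEC =====
def Spec_solution (n : Int) (out : Int) : Prop := out = solution_alt n
instance (n : Int) (out : Int) : Decidable (Spec_solution n out) := by unfold Spec_solution; infer_instance

-- ===== CLAIM (what is proved, stated in full; the proofs are below) =====
def Claim_equal_solution : Prop := ∀ (n : Int), Dom_solution n → Spec_solution n (solution n)

-- ===== LEMMAS AND PROOFS =====

-- A's Euclid loop on (6, r) for a residue r ∈ [0, 6) evaluates to B's table entry
theorem solGo_six (r : Int) (h0 : 0 ≤ r) (h6 : r < 6) :
    solGo 6 r = (if r = 0 then 6 else if r = 3 then 3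
                 else if PySem.Int.mod r 2 = 0 then 2 else 1) := by
  interval_cases r
  · rw [solGo]; norm_num
  · rw [solGo]; norm_num; rw [solGo]; norm_num
  · rw [solGo]; norm_num; rw [solGo]; norm_num
  · rw [solGo]; norm_num; rw [solGo]; norm_num
  · rw [solGo]; norm_num; rw [solGo]; norm_num; rw [solGo]; norm_num
  · rw [solGo]; norm_num; rw [solGo]; norm_num; rw [solGo]; norm_num

-- A's final expression n*6//d//6 collapses to n//d when d divides n and d > 0
theorem div_chain (d n : Int) (hd : 0 < d) (hdn : d ∣ n) :
    PySem.Int.floordiv (PySem.Int.floordiv (n * 6) d) 6 = PySem.Int.floordiv n d := by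
  obtain ⟨m, rfl⟩ := hdn
  rw [PySem.Int.floordiv_eq_ediv_of_pos hd,
      PySem.Int.floordiv_eq_ediv_of_pos (show (0:Int) < 6 by norm_num),
      PySem.Int.floordiv_eq_ediv_of_pos hd]
  rw [show d * m * 6 = (m * 6) * d by ring, Int.mul_ediv_cancel _ (ne_of_gt hd),
      Int.mul_ediv_cancel _ (show (6:Int) ≠ 0 by norm_num),
      show d * m = m * d by ring, Int.mul_ediv_cancel _ (ne_of_gt hd)]

-- ===== VERDICT (by name: the statement is the Claim_ definition above) =====
theorem solution_spec : Claim_equal_solution := by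
  intro n _
  show solution n = solution_alt n
  rw [show solution n = PySem.Int.floordiv (PySem.Int.floordiv (n * 6) (solGo n 6)) 6 from rfl,
      show solution_alt n = PySem.Int.floordiv n
        (if PySem.Int.mod n 6 = 0 then 6 else if PySem.Int.mod n 6 = 3 then 3
         else if PySem.Int.mod (PySem.Int.mod n 6) 2 = 0 then 2 else 1) from rfl]
  set r := PySem.Int.mod n 6 with hrdef
  have h0 : 0 ≤ r := PySem.Int.mod_nonneg n (by norm_num)
  have h6 : r < 6 := PySem.Int.mod_lt n (by norm_num)
  have hn : PySem.Int.floordiv n 6 * 6 + r = n := PySem.Int.floordiv_mul_add_mod n 6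
  have hstep : solGo n 6 = solGo 6 r := by
    rw [solGo, dif_neg (by norm_num : ¬(6:Int) = 0)]
  rw [hstep, solGo_six r h0 h6]
  -- the table entry divides n, since it divides both 6 and r and n = 6*q + r
  split_ifs with hc0 hc3 hc2
  · exact div_chain 6 n (by norm_num) (by omega)
  · exact div_chain 3 n (by norm_num) (by omega)
  · have h2r : (2:Int) ∣ r := (PySem.Int.mod_eq_zero_iff_dvd r 2).mp hc2
    exact div_chain 2 n (by norm_num) (by omega)
  · exact div_chain 1 n (by norm_num) (one_dvd n)
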